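-- pv_equiv track=rewrite | github.com/SAFeSEA/pyEssayAnalyser | src/EssayAnalyser/keywords_functions_betweenness_v8.py | keywords2trigrams
-- ===== SOURCE A (Python) =====
-- def keywords2trigrams(keywords, text):
--         win_start = 0
--         win_end = 3
--         mylist = []
--         mylist2 = []
--         mylist3 = []
--         while 1:
--                 win_words = text[win_start:win_end] # text[0:3] which is really text[0:3-1]
--                 if len(win_words) == 3:
--                         if win_words[0] in keywords and win_words[1] in keywords and win_words[2] in keywords:
--                                 if win_words not in mylist:
--                                     mylist.append(win_words)
--                                 elif win_words not in mylist2: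
--                                     mylist2.append(win_words)
--                                 elif win_words not in mylist3:
--                                     mylist3.append(win_words)
--                                 else:
--                                     mylist = mylist
--                         win_start += 1
--                         win_end += 1
--                 else:
--                         break
--         #return mylist # Return those phrases that occur at least 2 times
--         return mylist2 # Return those phrases that occur at least 2 times
-- ===== SOURCE B (Python) =====
-- def keywords2trigrams(keywords, text):
--     kw = set(keywords)
--     counts = {}
--     out = []
--     for i in range(len(text) - 2):
--         w = text[i:i+3]
--         if w[0] in kw and w[1] in kw and w[2] in kw:
--             t = (w[0], w[1], w[2])
--             c = counts.get(t, 0) + 1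
--             counts[t] = c
--             if c == 2:
--                 out.append(w)
--     return out
-- ===== Notes on version B (the rewrite author's own statement) =====
-- stated objective: faster
-- what changed: Replaces A's three append-only occurrence lists (each window does linear 'not in' scans over them) with a single hash dict counting each qualifying trigram, emitting the window exactly when its count reaches 2.
import Mathlib
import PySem

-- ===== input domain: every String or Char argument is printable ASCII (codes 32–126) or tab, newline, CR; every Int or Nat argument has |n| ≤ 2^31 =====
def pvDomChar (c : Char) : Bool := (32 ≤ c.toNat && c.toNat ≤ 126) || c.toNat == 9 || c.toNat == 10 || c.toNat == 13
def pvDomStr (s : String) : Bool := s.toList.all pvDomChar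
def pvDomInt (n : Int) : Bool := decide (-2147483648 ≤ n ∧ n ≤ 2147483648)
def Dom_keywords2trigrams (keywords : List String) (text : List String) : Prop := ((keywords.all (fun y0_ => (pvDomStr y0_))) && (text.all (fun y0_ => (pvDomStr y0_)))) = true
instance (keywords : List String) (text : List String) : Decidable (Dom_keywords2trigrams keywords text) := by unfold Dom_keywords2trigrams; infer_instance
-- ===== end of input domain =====

-- B replaces A's three deduplicated occurrence lists (quadratic membership scans) with a single
-- counting dict over the qualifying windows, emitting each trigram at its second occurrence.

-- B replaces A's three deduplicated occurrence lists (each probed by a linear membership scan per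
-- window) with one counting dict over the qualifying windows, emitting each trigram the moment its
-- count reaches 2; the proved claim is about the return value only.

-- ===== PORT A =====
def k2tStep (keywords : List String)
    (st : List (List String) × List (List String) × List (List String))
    (w : List String) : List (List String) × List (List String) × List (List String) :=
  let (m1, m2, m3) := st
  if keywords.contains (PySem.List.pyGetD w 0 "") &&
     keywords.contains (PySem.List.pyGetD w 1 "") &&
     keywords.contains (PySem.List.pyGetD w 2 "") then
    if !(m1.contains w) then (m1 ++ [w], m2, m3)
    else if !(m2.contains w) then (m1, m2 ++ [w], m3)
    else if !(m3.contains w) then (m1, m2, m3 ++ [w])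
    else (m1, m2, m3)
  else (m1, m2, m3)

def k2tAux (keywords text : List String) (winStart winEnd : Nat)
    (m1 m2 m3 : List (List String)) : List (List String) :=
  let w := PySem.List.slice text (some (winStart : Int)) (some (winEnd : Int))
  if h : w.length = 3 then
    match k2tStep keywords (m1, m2, m3) w with
    | (m1', m2', m3') => k2tAux keywords text (winStart + 1) (winEnd + 1) m1' m2' m3'
  else m2
termination_by text.length - winStart
decreasing_by
  simp only [w, PySem.List.length_slice, PySem.List.clampIdx_natCast] at h
  omega

def keywords2trigrams (keywords : List String) (text : List String) : List (List String) :=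
  k2tAux keywords text 0 3 [] [] []

-- ===== PORT B =====
def key3 (w : List String) : String × String × String :=
  (PySem.List.pyGetD w 0 "", PySem.List.pyGetD w 1 "", PySem.List.pyGetD w 2 "")
def k2tAltStep (kw : PySem.Set String)
    (st : PySem.Dict (String × String × String) Int × List (List String))
    (w : List String) : PySem.Dict (String × String × String) Int × List (List String) :=
  let (counts, out) := st
  if PySem.Set.contains kw (PySem.List.pyGetD w 0 "") &&
     PySem.Set.contains kw (PySem.List.pyGetD w 1 "") &&
     PySem.Set.contains kw (PySem.List.pyGetD w 2 "") then
    let t := key3 w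
    let c := counts.getD t 0 + 1
    let counts' := counts.insert t c
    if c = 2 then (counts', out ++ [w]) else (counts', out)
  else st

def keywords2trigrams_alt (keywords : List String) (text : List String) : List (List String) :=
  let kw : PySem.Set String := PySem.Set.ofList keywords
  ((PySem.List.pyRange 0 ((text.length : Int) - 2) 1).foldl
    (fun st i => k2tAltStep kw st (PySem.List.slice text (some i) (some (i + 3))))
    (PySem.Dict.empty, [])).2

-- ===== PRECONDITION & SPEC =====
def Spec_keywords2trigrams (keywords : List String) (text : List String) (out : List (List String)) : Prop := out = keywords2trigrams_alt keywords text
instance (keywords : List String) (text : List String) (out : List (List String)) : Decidable (Spec_keywords2trigrams keywords text out) := by unfold Spec_keywords2trigrams; infer_instance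

-- ===== CLAIM (what is proved, stated in full; the proofs are below) =====
def Claim_equal_keywords2trigrams : Prop := ∀ (keywords : List String) (text : List String), Dom_keywords2trigrams keywords text → Spec_keywords2trigrams keywords text (keywords2trigrams keywords text)

-- ===== LEMMAS AND PROOFS =====

def wins (text : List String) (s : Nat) : List (List String) :=
  (List.range (text.length - 2 - s)).map
    (fun k : Nat => PySem.List.slice text (some ((s : Int) + (k : Int))) (some ((s : Int) + (k : Int) + 3)))

lemma len_win (text : List String) (s : Nat) :
    (PySem.List.slice text (some (s : Int)) (some ((s : Int) + 3))).length =
      min (s + 3) text.length - min s text.length := by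
  have h3 : ((s : Int) + 3) = ((s + 3 : Nat) : Int) := by push_cast; ring
  rw [h3, PySem.List.length_slice]
  simp only [PySem.List.clampIdx_natCast]

lemma wins_len3 {text : List String} {s : Nat} : ∀ w ∈ wins text s, w.length = 3 := by
  intro w hw
  simp only [wins, List.mem_map, List.mem_range] at hw
  obtain ⟨k, hk, rfl⟩ := hw
  have h0 : ((s : Int) + (k : Int)) = ((s + k : Nat) : Int) := by push_cast; ring
  rw [h0, len_win text (s + k)]
  omega

lemma wins_cons {text : List String} {s : Nat} (h : s + 3 ≤ text.length) :
    wins text s =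
      PySem.List.slice text (some (s : Int)) (some ((s : Int) + 3)) :: wins text (s + 1) := by
  unfold wins
  have h2 : text.length - 2 - s = (text.length - 2 - (s + 1)) + 1 := by omega
  rw [h2, List.range_succ_eq_map, List.map_cons, List.map_map]
  congr 1
  apply List.map_congr_left
  intro k hk
  simp only [Function.comp_apply, Nat.succ_eq_add_one]
  push_cast
  ring_nf

lemma wins_nil {text : List String} {s : Nat} (h : text.length < s + 3) :
    wins text s = [] := by
  unfold wins
  have : text.length - 2 - s = 0 := by omega
  simp [this]

lemma auxA_eq_foldl (keywords text : List String) :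
    ∀ s m1 m2 m3, k2tAux keywords text s (s + 3) m1 m2 m3 =
      ((wins text s).foldl (k2tStep keywords) (m1, m2, m3)).2.1 := by
  intro s
  have key : ∀ fuel s m1 m2 m3, text.length - s ≤ fuel →
      k2tAux keywords text s (s + 3) m1 m2 m3 =
        ((wins text s).foldl (k2tStep keywords) (m1, m2, m3)).2.1 := by
    intro fuel
    induction fuel with
    | zero =>
      intro s m1 m2 m3 hf
      rw [k2tAux, wins_nil (by omega)]
      have hlen : (PySem.List.slice text (some (s : Int)) (some ((s : Int) + 3))).length ≠ 3 := by
        rw [len_win]; omega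
      simp only [Nat.cast_add, Nat.cast_ofNat] at *
      simp [hlen]
    | succ n ih =>
      intro s m1 m2 m3 hf
      rw [k2tAux]
      simp only [Nat.cast_add, Nat.cast_ofNat]
      by_cases hlen : (PySem.List.slice text (some (s : Int)) (some ((s : Int) + 3))).length = 3
      · have hsn : s + 3 ≤ text.length := by
          rw [len_win] at hlen; omega
        rw [wins_cons hsn]
        simp only [hlen, dif_pos, List.foldl_cons]
        rcases hst : k2tStep keywords (m1, m2, m3)
            (PySem.List.slice text (some (s : Int)) (some ((s : Int) + 3))) with ⟨a, b, c⟩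
        exact ih (s + 1) a b c (by omega)
      · rw [wins_nil ?_]
        · simp [hlen]
        · rw [len_win] at hlen
          omega
  intro m1 m2 m3; exact key (text.length - s) s m1 m2 m3 le_rfl

lemma altB_eq_foldl (keywords text : List String) :
    keywords2trigrams_alt keywords text =
      ((wins text 0).foldl (k2tAltStep (PySem.Set.ofList keywords)) (PySem.Dict.empty, [])).2 := by
  simp only [keywords2trigrams_alt, wins]
  rw [PySem.List.pyRange_one]
  have ht : ((text.length : Int) - 2 - 0).toNat = text.length - 2 - 0 := by omega
  rw [ht, List.foldl_map, List.foldl_map]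
  simp

lemma set_contains_ofList (ks : List String) (x : String) :
    PySem.Set.contains (PySem.Set.ofList ks) x = ks.contains x := by
  by_cases hx : x ∈ ks <;>
    simp [PySem.Set.contains_eq_listContains, PySem.Set.mem_ofList, hx]
lemma key3_inj {w v : List String} (hw : w.length = 3) (hv : v.length = 3)
    (h : key3 w = key3 v) : w = v := by
  obtain ⟨a, b, c, rfl⟩ := List.length_eq_three.mp hw
  obtain ⟨a', b', c', rfl⟩ := List.length_eq_three.mp hv
  simp [key3, PySem.List.pyGetD, PySem.List.pyGet?, PySem.List.pyIdx?] at h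
  simp [h]

lemma step_inv (keywords : List String)
    (m1 m2 m3 : List (List String)) (d : PySem.Dict (String × String × String) Int)
    (out : List (List String)) (w : List String) (hw3 : w.length = 3)
    (hout : m2 = out)
    (hpos : ∀ t, 0 ≤ d.getD t 0)
    (hm : ∀ v, v.length = 3 →
      ((v ∈ m1 ↔ 1 ≤ d.getD (key3 v) 0) ∧ (v ∈ m2 ↔ 2 ≤ d.getD (key3 v) 0) ∧
       (v ∈ m3 ↔ 3 ≤ d.getD (key3 v) 0))) :
    (k2tStep keywords (m1, m2, m3) w).2.1 = (k2tAltStep (PySem.Set.ofList keywords) (d, out) w).2 ∧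
    (∀ t, 0 ≤ (k2tAltStep (PySem.Set.ofList keywords) (d, out) w).1.getD t 0) ∧
    ∀ v, v.length = 3 →
      ((v ∈ (k2tStep keywords (m1, m2, m3) w).1 ↔
          1 ≤ (k2tAltStep (PySem.Set.ofList keywords) (d, out) w).1.getD (key3 v) 0) ∧
       (v ∈ (k2tStep keywords (m1, m2, m3) w).2.1 ↔
          2 ≤ (k2tAltStep (PySem.Set.ofList keywords) (d, out) w).1.getD (key3 v) 0) ∧
       (v ∈ (k2tStep keywords (m1, m2, m3) w).2.2 ↔
          3 ≤ (k2tAltStep (PySem.Set.ofList keywords) (d, out) w).1.getD (key3 v) 0)) := by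
  simp only [k2tStep, k2tAltStep, set_contains_ofList]
  by_cases hg : (keywords.contains (PySem.List.pyGetD w 0 "") &&
      keywords.contains (PySem.List.pyGetD w 1 "") &&
      keywords.contains (PySem.List.pyGetD w 2 "")) = true
  case neg =>
    simp only [hg, Bool.false_eq_true, if_false]
    exact ⟨hout, hpos, hm⟩
  case pos =>
  simp only [hg, if_true]
  obtain ⟨hm1, hm2, hm3⟩ := hm w hw3
  have hc0 : 0 ≤ d.getD (key3 w) 0 := hpos (key3 w)
  have hgetD : ∀ t : String × String × String,
      (d.insert (key3 w) (d.getD (key3 w) 0 + 1)).getD t 0 =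
        if t = key3 w then d.getD (key3 w) 0 + 1 else d.getD t 0 := by
    intro t; rw [PySem.Dict.getD_insert]
  have hpos' : ∀ t, 0 ≤ (d.insert (key3 w) (d.getD (key3 w) 0 + 1)).getD t 0 := by
    intro t; rw [hgetD t]
    by_cases ht : t = key3 w
    · rw [if_pos ht]; omega
    · rw [if_neg ht]; exact hpos t
  have hkey : ∀ v : List String, v.length = 3 → (key3 v = key3 w ↔ v = w) := by
    intro v hv3
    exact ⟨fun h => key3_inj hv3 hw3 h, fun h => by rw [h]⟩
  -- reduce the goal for each count interval
  have main : ∀ v, v.length = 3 →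
      ((v ∈ (if (!m1.contains w) = true then (m1 ++ [w], m2, m3)
          else if (!m2.contains w) = true then (m1, m2 ++ [w], m3)
          else if (!m3.contains w) = true then (m1, m2, m3 ++ [w]) else (m1, m2, m3)).1 ↔
          1 ≤ (d.insert (key3 w) (d.getD (key3 w) 0 + 1)).getD (key3 v) 0) ∧
       (v ∈ (if (!m1.contains w) = true then (m1 ++ [w], m2, m3)
          else if (!m2.contains w) = true then (m1, m2 ++ [w], m3)
          else if (!m3.contains w) = true then (m1, m2, m3 ++ [w]) else (m1, m2, m3)).2.1 ↔
          2 ≤ (d.insert (key3 w) (d.getD (key3 w) 0 + 1)).getD (key3 v) 0) ∧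
       (v ∈ (if (!m1.contains w) = true then (m1 ++ [w], m2, m3)
          else if (!m2.contains w) = true then (m1, m2 ++ [w], m3)
          else if (!m3.contains w) = true then (m1, m2, m3 ++ [w]) else (m1, m2, m3)).2.2 ↔
          3 ≤ (d.insert (key3 w) (d.getD (key3 w) 0 + 1)).getD (key3 v) 0)) := by
    intro v hv3
    obtain ⟨g1, g2, g3⟩ := hm v hv3
    rw [hgetD (key3 v)]
    by_cases hvw : v = w
    · subst hvw
      rw [if_pos rfl]
      by_cases h1 : v ∈ m1
      · have b1 : m1.contains v = true := List.contains_iff_mem.mpr h1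
        have hcv1 : 1 ≤ d.getD (key3 v) 0 := g1.mp h1
        by_cases h2 : v ∈ m2
        · have b2 : m2.contains v = true := List.contains_iff_mem.mpr h2
          have hcv2 : 2 ≤ d.getD (key3 v) 0 := g2.mp h2
          by_cases h3 : v ∈ m3
          · have b3 : m3.contains v = true := List.contains_iff_mem.mpr h3
            have hcv3 : 3 ≤ d.getD (key3 v) 0 := g3.mp h3
            simp only [b1, b2, b3, Bool.not_true, Bool.false_eq_true, if_false]
            exact ⟨⟨fun _ => by omega, fun _ => h1⟩, ⟨fun _ => by omega, fun _ => h2⟩,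
              ⟨fun _ => by omega, fun _ => h3⟩⟩
          · have b3 : m3.contains v = false :=
              Bool.eq_false_iff.mpr (fun hc => h3 (List.contains_iff_mem.mp hc))
            simp only [b1, b2, b3, Bool.not_true, Bool.not_false, Bool.false_eq_true,
              if_false, if_true, List.mem_append, List.mem_singleton]
            exact ⟨⟨fun _ => by omega, fun _ => h1⟩, ⟨fun _ => by omega, fun _ => h2⟩,
              ⟨fun _ => by omega, fun _ => by simp⟩⟩
        · have b2 : m2.contains v = false :=
            Bool.eq_false_iff.mpr (fun hc => h2 (List.contains_iff_mem.mp hc))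
          have hcv2 : ¬ 2 ≤ d.getD (key3 v) 0 := fun hh => h2 (g2.mpr hh)
          have h3 : v ∉ m3 := fun hh => hcv2 (by have := g3.mp hh; omega)
          simp only [b1, b2, Bool.not_true, Bool.not_false, Bool.false_eq_true,
            if_false, if_true, List.mem_append, List.mem_singleton]
          exact ⟨⟨fun _ => by omega, fun _ => h1⟩, ⟨fun _ => by omega, fun _ => by simp⟩,
            ⟨fun hh => absurd hh h3, fun hh => by omega⟩⟩
      · have b1 : m1.contains v = false :=
          Bool.eq_false_iff.mpr (fun hc => h1 (List.contains_iff_mem.mp hc))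
        have hcv : ¬ 1 ≤ d.getD (key3 v) 0 := fun hh => h1 (g1.mpr hh)
        have h2 : v ∉ m2 := fun hh => hcv (by have := g2.mp hh; omega)
        have h3 : v ∉ m3 := fun hh => hcv (by have := g3.mp hh; omega)
        simp only [b1, Bool.not_false, if_true, List.mem_append, List.mem_singleton]
        exact ⟨⟨fun _ => by omega, fun _ => by simp⟩,
          ⟨fun hh => absurd hh h2, fun hh => by omega⟩,
          ⟨fun hh => absurd hh h3, fun hh => by omega⟩⟩
    · have hk : ¬ (key3 v = key3 w) := fun h => hvw ((hkey v hv3).mp h)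
      rw [if_neg hk]
      have hmem : ∀ l : List (List String), v ∈ l ++ [w] ↔ v ∈ l := by
        intro l; simp [List.mem_append, hvw]
      split_ifs <;>
        simp only [hmem] <;> exact ⟨g1, g2, g3⟩
  refine ⟨?_, ?_, fun v hv3 => by
    simpa only [apply_ite Prod.fst, ite_self] using main v hv3⟩
  · -- output lists
    by_cases h1 : w ∈ m1
    · have b1 : m1.contains w = true := List.contains_iff_mem.mpr h1
      by_cases h2 : w ∈ m2
      · have b2 : m2.contains w = true := List.contains_iff_mem.mpr h2
        have hcv : 2 ≤ d.getD (key3 w) 0 := hm2.mp h2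
        have hne : ¬ (d.getD (key3 w) 0 + 1 = 2) := by omega
        by_cases h3 : w ∈ m3
        · have b3 : m3.contains w = true := List.contains_iff_mem.mpr h3
          simp only [b1, b2, b3, Bool.not_true, Bool.false_eq_true, if_false, hne]
          exact hout
        · have b3 : m3.contains w = false :=
            Bool.eq_false_iff.mpr (fun hc => h3 (List.contains_iff_mem.mp hc))
          simp only [b1, b2, b3, Bool.not_true, Bool.not_false, Bool.false_eq_true,
            if_false, if_true, hne]
          exact hout
      · have b2 : m2.contains w = false :=
          Bool.eq_false_iff.mpr (fun hc => h2 (List.contains_iff_mem.mp hc))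
        have hcv1 : 1 ≤ d.getD (key3 w) 0 := hm1.mp h1
        have hcv2 : ¬ 2 ≤ d.getD (key3 w) 0 := fun hh => h2 (hm2.mpr hh)
        have heq : d.getD (key3 w) 0 + 1 = 2 := by omega
        simp only [b1, b2, Bool.not_true, Bool.not_false, Bool.false_eq_true,
          if_false, if_true, heq]
        rw [hout]
    · have b1 : m1.contains w = false :=
        Bool.eq_false_iff.mpr (fun hc => h1 (List.contains_iff_mem.mp hc))
      have hcv : ¬ 1 ≤ d.getD (key3 w) 0 := fun hh => h1 (hm1.mpr hh)
      have hne : ¬ (d.getD (key3 w) 0 + 1 = 2) := by omega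
      simp only [b1, Bool.not_false, if_true, hne, if_false]
      exact hout
  · simpa only [apply_ite Prod.fst, ite_self] using hpos'

lemma main_inv (keywords : List String) (p : List (List String)) (hlen : ∀ w ∈ p, w.length = 3) :
    (p.foldl (k2tStep keywords) ([], [], [])).2.1 =
      (p.foldl (k2tAltStep (PySem.Set.ofList keywords)) (PySem.Dict.empty, [])).2 ∧
    (∀ t, 0 ≤ (p.foldl (k2tAltStep (PySem.Set.ofList keywords)) (PySem.Dict.empty, [])).1.getD t 0) ∧
    ∀ v, v.length = 3 →
      ((v ∈ (p.foldl (k2tStep keywords) ([], [], [])).1 ↔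
          1 ≤ (p.foldl (k2tAltStep (PySem.Set.ofList keywords)) (PySem.Dict.empty, [])).1.getD (key3 v) 0) ∧
       (v ∈ (p.foldl (k2tStep keywords) ([], [], [])).2.1 ↔
          2 ≤ (p.foldl (k2tAltStep (PySem.Set.ofList keywords)) (PySem.Dict.empty, [])).1.getD (key3 v) 0) ∧
       (v ∈ (p.foldl (k2tStep keywords) ([], [], [])).2.2 ↔
          3 ≤ (p.foldl (k2tAltStep (PySem.Set.ofList keywords)) (PySem.Dict.empty, [])).1.getD (key3 v) 0)) := by
  induction p using List.reverseRecOn with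
  | nil =>
    simp [PySem.Dict.getD_empty]
  | append_singleton p w ih =>
    have hw3 : w.length = 3 := hlen w (by simp)
    have hp : ∀ v ∈ p, v.length = 3 := fun v hv => hlen v (by simp [hv])
    obtain ⟨hout, hpos, hm⟩ := ih hp
    simp only [List.foldl_append, List.foldl_cons, List.foldl_nil]
    have := step_inv keywords (p.foldl (k2tStep keywords) ([], [], [])).1
      (p.foldl (k2tStep keywords) ([], [], [])).2.1
      (p.foldl (k2tStep keywords) ([], [], [])).2.2
      (p.foldl (k2tAltStep (PySem.Set.ofList keywords)) (PySem.Dict.empty, [])).1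
      (p.foldl (k2tAltStep (PySem.Set.ofList keywords)) (PySem.Dict.empty, [])).2
      w hw3 hout hpos hm
    simpa only [Prod.mk.eta] using this

-- ===== VERDICT (by name: the statement is the Claim_ definition above) =====
theorem keywords2trigrams_spec : Claim_equal_keywords2trigrams := by
  intro keywords text _
  unfold Spec_keywords2trigrams keywords2trigrams
  have hA := auxA_eq_foldl keywords text 0 [] [] []
  norm_num at hA
  rw [hA, altB_eq_foldl]
  exact (main_inv keywords (wins text 0) wins_len3).1
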